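-- pv_equiv track=rewrite | github.com/arnab2704/qapulse | server.py | _test_summary
-- ===== SOURCE A (Python) =====
-- def _test_summary(tests, max_tests=3):
--     """Short summary of test names (prefer failed) for list views."""
--     if not tests:
--         return ""
--     # Prefer failed tests first
--     failed = [t for t in tests if (t.get("status") == "failed")]
--     ordered = failed + [t for t in tests if t not in failed]
--
--     seen = set()
--     names = []
--     for t in ordered:
--         n = (t.get("name") or t.get("full_name") or "").strip()
--         if n and n not in seen:
--             seen.add(n)
--             names.append(n)
--     if not names:
--         return ""
--     display = ", ".join(names[:max_tests])
--     if len(names) > max_tests: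
--         display += f" (+{len(names) - max_tests})"
--     return display
-- ===== SOURCE B (Python) =====
-- def _test_summary(tests, max_tests=3):
--     """Short summary of test names (prefer failed) for list views."""
--     def clean(t):
--         return (t.get("name") or t.get("full_name") or "").strip()
--     failed = [n for n in dict.fromkeys(clean(t) for t in tests if t.get("status") == "failed") if n]
--     others = [n for n in dict.fromkeys(clean(t) for t in tests if t.get("status") != "failed") if n]
--     names = failed + [n for n in others if n not in failed]
--     if not names:
--         return ""
--     if len(names) <= max_tests:
--         return ", ".join(names)
--     return ", ".join(names[:max_tests]) + f" (+{len(names) - max_tests})"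
-- ===== Notes on version B (the rewrite author's own statement) =====
-- stated objective: idiomatic
-- what changed: A reorders the test list failed-first (quadratic 'not in failed' scan) and dedups it with one shared seen-set loop; B never reorders tests: it builds the deduped failed and non-failed name lists separately with dict.fromkeys (staged comprehensions, no explicit loop or seen-set), concatenates them, and uses a two-branch truncation instead of A's conditional tag append.
import Mathlib
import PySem

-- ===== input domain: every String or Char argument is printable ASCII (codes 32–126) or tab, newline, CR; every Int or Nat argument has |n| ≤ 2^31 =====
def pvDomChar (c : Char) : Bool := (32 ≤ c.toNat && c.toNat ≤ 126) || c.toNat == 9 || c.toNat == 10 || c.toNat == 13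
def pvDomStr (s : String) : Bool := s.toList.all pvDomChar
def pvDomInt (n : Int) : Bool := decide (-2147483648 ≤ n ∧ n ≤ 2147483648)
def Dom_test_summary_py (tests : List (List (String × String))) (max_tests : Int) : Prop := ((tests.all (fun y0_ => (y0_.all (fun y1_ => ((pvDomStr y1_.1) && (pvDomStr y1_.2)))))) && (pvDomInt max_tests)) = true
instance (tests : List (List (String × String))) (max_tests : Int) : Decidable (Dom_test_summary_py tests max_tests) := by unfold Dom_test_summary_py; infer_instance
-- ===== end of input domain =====

-- B is a staged-pass rewrite: deduped failed / non-failed name lists built separately (dict.fromkeys), no reordered test list and no shared seen-set loop (return value only; no mutation).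

-- shared helpers: `t.get("name") or t.get("full_name") or ""` then .strip(), and the status test
def pvName (t : List (String × String)) : String :=
  PySem.Str.strip
    (match (PySem.Dict.mk t).get? "name" with
     | some s => if s ≠ "" then s else (((PySem.Dict.mk t).get? "full_name").getD "")
     | none => ((PySem.Dict.mk t).get? "full_name").getD "")

def pvIsFailed (t : List (String × String)) : Bool :=
  (PySem.Dict.mk t).get? "status" == some "failed"

-- ===== PORT A =====
def test_summary_py (tests : List (List (String × String))) (max_tests : Int) : String :=
  if tests = [] then ""
  else
    let failed := tests.filter (fun t => pvIsFailed t)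
    let ordered := failed ++ tests.filter (fun t => !(failed.contains t))
    let st := ordered.foldl
      (fun (st : PySem.Set String × List String) t =>
        let n := pvName t
        if n ≠ "" ∧ ¬ (PySem.Set.contains st.1 n = true) then (PySem.Set.add st.1 n, st.2 ++ [n]) else st)
      (PySem.Set.empty, [])
    let names := st.2
    if names = [] then ""
    else
      let display := PySem.Str.join ", " (PySem.List.slice names none (some max_tests))
      if (names.length : Int) > max_tests then
        display ++ " (+" ++ PySem.Int.toStr ((names.length : Int) - max_tests) ++ ")"
      else display

-- ===== PORT B =====
-- dict.fromkeys-style ordered dedup is PySem.List.dedup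
def test_summary_py_alt (tests : List (List (String × String))) (max_tests : Int) : String :=
  let failed := (PySem.List.dedup ((tests.filter (fun t => pvIsFailed t)).map pvName)).filter (fun n => n ≠ "")
  let others := (PySem.List.dedup ((tests.filter (fun t => !(pvIsFailed t))).map pvName)).filter (fun n => n ≠ "")
  let names := failed ++ others.filter (fun n => !(failed.contains n))
  if names = [] then ""
  else if (names.length : Int) ≤ max_tests then PySem.Str.join ", " names
  else PySem.Str.join ", " (PySem.List.slice names none (some max_tests))
        ++ " (+" ++ PySem.Int.toStr ((names.length : Int) - max_tests) ++ ")"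

-- ===== PRECONDITION & SPEC =====
def Spec_test_summary_py (tests : List (List (String × String))) (max_tests : Int) (out : String) : Prop := out = test_summary_py_alt tests max_tests
instance (tests : List (List (String × String))) (max_tests : Int) (out : String) : Decidable (Spec_test_summary_py tests max_tests out) := by unfold Spec_test_summary_py; infer_instance

-- ===== CLAIM (what is proved, stated in full; the proofs are below) =====
def Claim_equal_test_summary_py : Prop := ∀ (tests : List (List (String × String))) (max_tests : Int), Dom_test_summary_py tests max_tests → Spec_test_summary_py tests max_tests (test_summary_py tests max_tests)

-- ===== LEMMAS AND PROOFS =====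

-- A's dedup loop, abstracted over the incoming name list: output names and final seen set
def pvDed (l : List String) (S : PySem.Set String) : List String :=
  match l with
  | [] => []
  | n :: l => if n ≠ "" ∧ ¬ (PySem.Set.contains S n = true) then n :: pvDed l (PySem.Set.add S n) else pvDed l S

def pvFin (l : List String) (S : PySem.Set String) : PySem.Set String :=
  match l with
  | [] => S
  | n :: l => if n ≠ "" ∧ ¬ (PySem.Set.contains S n = true) then pvFin l (PySem.Set.add S n) else pvFin l S

theorem pvContains_iff (s : PySem.Set String) (x : String) :
    PySem.Set.contains s x = true ↔ x ∈ s := by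
  simp [PySem.Set.contains_eq_listContains]

theorem pvDed_cons (n : String) (l : List String) (S : PySem.Set String) :
    pvDed (n :: l) S = if n ≠ "" ∧ ¬ (PySem.Set.contains S n = true) then n :: pvDed l (PySem.Set.add S n) else pvDed l S := rfl

theorem pvFin_cons (n : String) (l : List String) (S : PySem.Set String) :
    pvFin (n :: l) S = if n ≠ "" ∧ ¬ (PySem.Set.contains S n = true) then pvFin l (PySem.Set.add S n) else pvFin l S := rfl

theorem pvLoopA (l : List String) (S : PySem.Set String) (acc : List String) :
    l.foldl (fun (st : PySem.Set String × List String) n =>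
        if n ≠ "" ∧ ¬ (PySem.Set.contains st.1 n = true) then (PySem.Set.add st.1 n, st.2 ++ [n]) else st)
      (S, acc) = (pvFin l S, acc ++ pvDed l S) := by
  induction l generalizing S acc with
  | nil => simp [pvDed, pvFin]
  | cons n l ih =>
    simp only [List.foldl_cons]
    by_cases h : n ≠ "" ∧ ¬ (PySem.Set.contains S n = true)
    · rw [if_pos h, ih, pvFin_cons, if_pos h, pvDed_cons, if_pos h]
      simp
    · rw [if_neg h, ih, pvFin_cons, if_neg h, pvDed_cons, if_neg h]

theorem pvDed_append (l₁ l₂ : List String) (S : PySem.Set String) :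
    pvDed (l₁ ++ l₂) S = pvDed l₁ S ++ pvDed l₂ (pvFin l₁ S) := by
  induction l₁ generalizing S with
  | nil => simp [pvDed, pvFin]
  | cons n l ih =>
    rw [List.cons_append]
    by_cases h : n ≠ "" ∧ ¬ (PySem.Set.contains S n = true)
    · rw [pvDed_cons, if_pos h, pvDed_cons, if_pos h, pvFin_cons, if_pos h, ih, List.cons_append]
    · rw [pvDed_cons, if_neg h, pvDed_cons, if_neg h, pvFin_cons, if_neg h, ih]

theorem pvMem_pvFin (l : List String) (S : PySem.Set String) (x : String) :
    x ∈ pvFin l S ↔ x ∈ S ∨ (x ∈ l ∧ x ≠ "") := by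
  induction l generalizing S with
  | nil => simp [pvFin]
  | cons n l ih =>
    rw [pvFin_cons]
    by_cases h : n ≠ "" ∧ ¬ (PySem.Set.contains S n = true)
    · rw [if_pos h, ih, PySem.Set.mem_add]
      constructor
      · rintro ((hx | rfl) | hx)
        · exact Or.inl hx
        · exact Or.inr ⟨List.mem_cons_self, h.1⟩
        · exact Or.inr ⟨List.mem_cons_of_mem _ hx.1, hx.2⟩
      · rintro (hx | ⟨hm, hne⟩)
        · exact Or.inl (Or.inl hx)
        · rcases List.mem_cons.mp hm with rfl | hm
          · exact Or.inl (Or.inr rfl)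
          · exact Or.inr ⟨hm, hne⟩
    · rw [if_neg h, ih]
      rcases not_and_or.mp h with hn | hc
      · have hn : n = "" := not_not.mp hn
        subst hn
        constructor
        · rintro (hx | hx)
          · exact Or.inl hx
          · exact Or.inr ⟨List.mem_cons_of_mem _ hx.1, hx.2⟩
        · rintro (hx | ⟨hm, hne⟩)
          · exact Or.inl hx
          · rcases List.mem_cons.mp hm with rfl | hm
            · exact absurd rfl hne
            · exact Or.inr ⟨hm, hne⟩
      · have hnS : n ∈ S := (pvContains_iff _ _).mp (not_not.mp hc)
        constructor
        · rintro (hx | hx)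
          · exact Or.inl hx
          · exact Or.inr ⟨List.mem_cons_of_mem _ hx.1, hx.2⟩
        · rintro (hx | ⟨hm, hne⟩)
          · exact Or.inl hx
          · rcases List.mem_cons.mp hm with rfl | hm
            · exact Or.inl hnS
            · exact Or.inr ⟨hm, hne⟩

theorem pvContains_add (S : PySem.Set String) (n x : String) :
    PySem.Set.contains (PySem.Set.add S n) x = (PySem.Set.contains S x || x == n) := by
  rw [Bool.eq_iff_iff]
  simp [PySem.Set.mem_add]

-- A's seen-set dedup is B's dict.fromkeys dedup followed by a filter
theorem pvDed_eq (l : List String) (S : PySem.Set String) :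
    pvDed l S = (PySem.Set.ofList l).filter (fun n => n ≠ "" && !(PySem.Set.contains S n)) := by
  induction l generalizing S with
  | nil => simp [pvDed, PySem.Set.ofList_nil]
  | cons n l ih =>
    rw [pvDed_cons, PySem.Set.ofList_cons, List.filter_cons]
    by_cases h : n ≠ "" ∧ ¬ (PySem.Set.contains S n = true)
    · have hc : PySem.Set.contains S n = false := by
        cases hcc : PySem.Set.contains S n
        · rfl
        · exact absurd hcc h.2
      have hcond : (decide (n ≠ "") && !(PySem.Set.contains S n)) = true := by
        rw [hc]; simp [h.1]
      rw [if_pos h, if_pos hcond, ih]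
      congr 1
      rw [PySem.Set.discard, List.filter_filter]
      refine List.filter_congr fun x _ => ?_
      rw [pvContains_add]
      by_cases hx : x = n
      · subst hx; simp
      · simp [Bool.and_assoc]
    · have hp : (decide (n ≠ "") && !(PySem.Set.contains S n)) = false := by
        rcases not_and_or.mp h with hn | hcc
        · rw [not_not.mp hn]; simp
        · rw [not_not.mp hcc]; simp
      rw [if_neg h, if_neg (by rw [hp]; exact Bool.false_ne_true), ih]
      rw [PySem.Set.discard, List.filter_filter]
      refine List.filter_congr fun x _ => ?_
      by_cases hx : x = n
      · subst hx
        rw [hp]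
        simp
      · simp [hx]

theorem pvDed_empty (l : List String) :
    pvDed l PySem.Set.empty = (PySem.List.dedup l).filter (fun n => n ≠ "") := by
  simp only [PySem.List.dedup]
  rw [pvDed_eq]
  refine List.filter_congr fun x _ => ?_
  simp [PySem.Set.empty, PySem.Set.contains_eq_listContains]

-- A's "t not in failed" agrees with B's status test on members of tests
theorem pvOthers_eq (tests : List (List (String × String))) :
    tests.filter (fun t => !((tests.filter (fun t => pvIsFailed t)).contains t))
      = tests.filter (fun t => !(pvIsFailed t)) := by
  apply List.filter_congr
  intro t ht
  by_cases hf : pvIsFailed t = true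
  · simp [hf, List.mem_filter, ht]
  · have hfb : pvIsFailed t = false := by simpa using hf
    simp [hfb, List.mem_filter]

-- the second segment of A's name list is B's 'not in failed' filter of the deduped others
theorem pvSecond_eq (F O : List String) :
    pvDed O (pvFin F PySem.Set.empty)
      = ((PySem.List.dedup O).filter (fun n => n ≠ "")).filter
          (fun n => !(((PySem.List.dedup F).filter (fun n => n ≠ "")).contains n)) := by
  simp only [PySem.List.dedup]
  rw [pvDed_eq, List.filter_filter]
  refine List.filter_congr fun x _ => ?_
  by_cases hxe : x = ""
  · subst hxe; simp
  · have h1 : PySem.Set.contains (pvFin F PySem.Set.empty) x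
        = (List.filter (fun n => decide (n ≠ "")) (PySem.Set.ofList F)).contains x := by
      rw [Bool.eq_iff_iff]
      rw [pvContains_iff, pvMem_pvFin, List.contains_iff_mem, List.mem_filter,
        PySem.Set.mem_ofList]
      simp [PySem.Set.empty, hxe]
    rw [h1]
    simp [hxe, Bool.and_comm]

-- the common tail: A's conditional tag append is B's two-branch truncation
theorem pvTail (N : List String) (m : Int) :
    (if N = [] then ""
     else
       if (N.length : Int) > m then
         PySem.Str.join ", " (PySem.List.slice N none (some m)) ++ " (+" ++ PySem.Int.toStr ((N.length : Int) - m) ++ ")"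
       else PySem.Str.join ", " (PySem.List.slice N none (some m)))
    = (if N = [] then ""
       else if (N.length : Int) ≤ m then PySem.Str.join ", " N
       else PySem.Str.join ", " (PySem.List.slice N none (some m)) ++ " (+" ++ PySem.Int.toStr ((N.length : Int) - m) ++ ")") := by
  by_cases hNe : N = []
  · simp [hNe]
  · rw [if_neg hNe, if_neg hNe]
    have hpos : 0 < N.length := List.length_pos_iff.mpr hNe
    by_cases hle : (N.length : Int) ≤ m
    · rw [if_pos hle, if_neg (by omega)]
      rw [PySem.List.slice_to N (by omega), List.take_of_length_le (by omega)]
    · rw [if_neg hle, if_pos (by omega)]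

-- ===== VERDICT (by name: the statement is the Claim_ definition above) =====
set_option maxHeartbeats 1000000 in
theorem test_summary_py_spec : Claim_equal_test_summary_py := by
  intro tests max_tests _
  unfold Spec_test_summary_py test_summary_py test_summary_py_alt
  by_cases h0 : tests = []
  · subst h0
    simp [PySem.List.dedup, PySem.Set.ofList_nil]
  · rw [if_neg h0]
    simp only [pvOthers_eq]
    rw [show (fun (st : PySem.Set String × List String) (t : List (String × String)) =>
          let n := pvName t
          if n ≠ "" ∧ ¬ (PySem.Set.contains st.1 n = true) then (PySem.Set.add st.1 n, st.2 ++ [n]) else st)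
        = (fun (st : PySem.Set String × List String) (t : List (String × String)) =>
            (fun (st : PySem.Set String × List String) (n : String) =>
              if n ≠ "" ∧ ¬ (PySem.Set.contains st.1 n = true) then (PySem.Set.add st.1 n, st.2 ++ [n]) else st)
            st (pvName t)) from rfl]
  -- turn the foldl over tests into a foldl over the mapped name list
    have hM : (List.filter (fun t => pvIsFailed t) tests
          ++ List.filter (fun t => !(pvIsFailed t)) tests).foldl
        (fun (st : PySem.Set String × List String) (t : List (String × String)) =>
          (fun (st : PySem.Set String × List String) (n : String) =>
            if n ≠ "" ∧ ¬ (PySem.Set.contains st.1 n = true) then (PySem.Set.add st.1 n, st.2 ++ [n]) else st)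
          st (pvName t))
        (PySem.Set.empty, ([] : List String))
        = ((List.filter (fun t => pvIsFailed t) tests
          ++ List.filter (fun t => !(pvIsFailed t)) tests).map pvName).foldl
        (fun (st : PySem.Set String × List String) (n : String) =>
          if n ≠ "" ∧ ¬ (PySem.Set.contains st.1 n = true) then (PySem.Set.add st.1 n, st.2 ++ [n]) else st)
        (PySem.Set.empty, ([] : List String)) := by rw [List.foldl_map]
    rw [hM, List.map_append, pvLoopA]
    simp only [List.nil_append]
    rw [pvDed_append, pvSecond_eq, pvDed_empty]
    exact pvTail _ max_tests
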